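-- pv_equiv track=rewrite | github.com/KevinYyyyyy/PyVulAudit | data_collection/analyze_call_graph.py | find_truncated_call_chains
-- ===== SOURCE A (Python) =====
-- def find_truncated_call_chains(call_graph, start_func, target_keywords):
--     """
--     查找从指定函数开始的所有可能调用链，并在找到目标关键字时截断调用链。
--     """
--     all_chains = []
--
--     def dfs(func, current_chain, visited):
--         # 检查是否已经访问过当前函数（避免循环依赖）
--         if func in visited:
--             return
--         visited.add(func)
--
--         # 将当前函数加入调用链
--         current_chain.append(func)
--
--         # 检查是否满足目标关键字条件
--         if all(keyword in " -> ".join(current_chain) for keyword in target_keywords):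
--             all_chains.append(list(current_chain))  # 保存当前调用链
--             current_chain.pop()  # 回溯
--             visited.remove(func)
--             return
--
--         # 继续递归查找
--         for called_func in sorted(call_graph.get(func, [])):
--             dfs(called_func, current_chain, visited)
--
--         # 回溯：移除当前函数并标记为未访问
--         current_chain.pop()
--         visited.remove(func)
--
--     # 开始递归查找
--     dfs(start_func, [], set())
--     return all_chains
-- ===== SOURCE B (Python) =====
-- def find_truncated_call_chains(call_graph, start_func, target_keywords):
--     """Iterative DFS with an explicit stack of (func, path) frames; the cycle
--     guard is per-path membership (equivalent to A's backtracking visited set)."""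
--     all_chains = []
--     stack = [(start_func, [])]
--     while stack:
--         func, path = stack.pop()
--         if func in path:
--             continue
--         new_path = path + [func]
--         joined = " -> ".join(new_path)
--         if all(keyword in joined for keyword in target_keywords):
--             all_chains.append(new_path)
--             continue
--         for called_func in reversed(sorted(call_graph.get(func, []))):
--             stack.append((called_func, new_path))
--     return all_chains
-- ===== Notes on version B (the rewrite author's own statement) =====
-- stated objective: alternative
-- what changed: The recursive backtracking DFS with a mutable visited set and shared chain buffer is replaced by an iterative DFS over an explicit stack of (func, path) frames, with a per-path cycle guard and children pushed reverse-sorted so preorder output order is preserved.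
import Mathlib
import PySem

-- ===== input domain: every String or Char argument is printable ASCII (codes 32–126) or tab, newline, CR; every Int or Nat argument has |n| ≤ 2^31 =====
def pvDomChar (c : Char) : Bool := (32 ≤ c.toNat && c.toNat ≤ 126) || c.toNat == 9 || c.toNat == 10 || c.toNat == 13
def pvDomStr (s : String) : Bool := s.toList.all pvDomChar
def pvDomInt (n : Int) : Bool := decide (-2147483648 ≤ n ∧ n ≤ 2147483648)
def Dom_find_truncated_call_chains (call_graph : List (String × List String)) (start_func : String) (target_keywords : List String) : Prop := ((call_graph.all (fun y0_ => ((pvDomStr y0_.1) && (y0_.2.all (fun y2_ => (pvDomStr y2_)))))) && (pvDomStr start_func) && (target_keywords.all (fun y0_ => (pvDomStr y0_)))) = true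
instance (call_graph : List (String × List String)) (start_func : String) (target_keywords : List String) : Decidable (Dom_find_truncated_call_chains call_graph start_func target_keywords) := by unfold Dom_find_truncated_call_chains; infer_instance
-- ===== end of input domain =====

-- B replaces A's recursive backtracking DFS (mutable visited set + shared chain buffer)
-- by an iterative DFS over an explicit stack of (func, path) frames; same return value.

-- ===== PORT A =====
-- shared line of both Pythons: all(keyword in " -> ".join(chain) for keyword in target_keywords)
def pvHit (tks : List String) (chain : List String) : Bool :=
  tks.all (fun k => PySem.Str.isIn k (PySem.Str.join " -> " chain))

-- shared line of both Pythons: sorted(call_graph.get(func, []))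
def pvKids (cg : List (String × List String)) (func : String) : List String :=
  PySem.List.sorted ((PySem.Dict.mk cg).getD func []) (fun x => x) false

-- every function name a dfs call can ever receive (fuel bound for the ports' recursion)
def pvNodes (cg : List (String × List String)) (s : String) : List String :=
  s :: cg.flatMap (fun p => p.2)

-- A's inner dfs: results are accumulated in call order (all_chains.append ⇒ foldl-append);
-- fuel only makes the recursion total — it is never exhausted on the ports' actual calls.
def pvDfsA (cg : List (String × List String)) (tks : List String) :
    Nat → String → List String → PySem.Set String → List (List String)
  | 0, _, _, _ => []
  | fuel + 1, func, chain, visited =>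
    if PySem.Set.contains visited func then []
    else
      let visited' := PySem.Set.add visited func
      let chain' := chain ++ [func]
      if pvHit tks chain' then [chain']
      else (pvKids cg func).foldl (fun acc c => acc ++ pvDfsA cg tks fuel c chain' visited') []

def find_truncated_call_chains (call_graph : List (String × List String)) (start_func : String) (target_keywords : List String) : List (List String) :=
  pvDfsA call_graph target_keywords ((pvNodes call_graph start_func).length + 1) start_func [] PySem.Set.empty

-- ===== PORT B =====
-- B's while-loop over the explicit stack (head of the list = top of the stack); the
-- reversed push loop is the foldl over (pvKids …).reverse. Fuel is a totality guard only.
def pvRunB (cg : List (String × List String)) (tks : List String) :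
    Nat → List (String × List String) → List (List String)
  | _, [] => []
  | 0, _ :: _ => []
  | fuel + 1, (func, path) :: rest =>
    if path.contains func then pvRunB cg tks fuel rest
    else
      let np := path ++ [func]
      if pvHit tks np then np :: pvRunB cg tks fuel rest
      else pvRunB cg tks fuel ((pvKids cg func).reverse.foldl (fun st c => (c, np) :: st) rest)

def find_truncated_call_chains_alt (call_graph : List (String × List String)) (start_func : String) (target_keywords : List String) : List (List String) :=
  pvRunB call_graph target_keywords
    (((call_graph.flatMap (fun p => p.2)).length + 1) ^ ((pvNodes call_graph start_func).length + 1))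
    [(start_func, [])]

-- ===== PRECONDITION & SPEC =====
def Spec_find_truncated_call_chains (call_graph : List (String × List String)) (start_func : String) (target_keywords : List String) (out : List (List String)) : Prop := out = find_truncated_call_chains_alt call_graph start_func target_keywords
instance (call_graph : List (String × List String)) (start_func : String) (target_keywords : List String) (out : List (List String)) : Decidable (Spec_find_truncated_call_chains call_graph start_func target_keywords out) := by unfold Spec_find_truncated_call_chains; infer_instance

-- ===== CLAIM (what is proved, stated in full; the proofs are below) =====
def Claim_equal_find_truncated_call_chains : Prop := ∀ (call_graph : List (String × List String)) (start_func : String) (target_keywords : List String), Dom_find_truncated_call_chains call_graph start_func target_keywords → Spec_find_truncated_call_chains call_graph start_func target_keywords (find_truncated_call_chains call_graph start_func target_keywords)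

-- ===== LEMMAS AND PROOFS =====

-- fuel-free shape of A's dfs (visited set replaced by path membership; results as flatMap)
def pvDfsP (cg : List (String × List String)) (tks : List String) :
    Nat → String → List String → List (List String)
  | 0, _, _ => []
  | f + 1, func, path =>
    if func ∈ path then []
    else
      let np := path ++ [func]
      if pvHit tks np then [np]
      else (pvKids cg func).flatMap (fun c => pvDfsP cg tks f c np)

-- number of loop iterations B spends on one frame
def pvCost (cg : List (String × List String)) (tks : List String) :
    Nat → String → List String → Nat
  | 0, _, _ => 1
  | f + 1, func, path =>
    if func ∈ path then 1
    else
      let np := path ++ [func]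
      if pvHit tks np then 1
      else 1 + ((pvKids cg func).map (fun c => pvCost cg tks f c np)).sum

-- recursion measure: nodes of U not yet on the path
def pvM (U : List String) (path : List String) : Nat :=
  U.countP (fun x => decide (x ∉ path))

theorem pvM_lt (U path : List String) (func : String) (hU : func ∈ U) (hp : func ∉ path) :
    pvM U (path ++ [func]) < pvM U path := by
  induction U with
  | nil => simp at hU
  | cons u t ih =>
    simp only [pvM, List.countP_cons] at ih ⊢
    have mono : List.countP (fun x => decide (x ∉ path ++ [func])) t ≤
        List.countP (fun x => decide (x ∉ path)) t := by
      apply List.countP_mono_left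
      intro x _ hx
      simp at hx ⊢
      exact hx.1
    by_cases hu : func = u
    · have h1 : (decide (u ∉ path ++ [func])) = false := by simp [← hu]
      have h2 : (decide (u ∉ path)) = true := by simp [← hu]; exact hp
      rw [h1, h2, if_neg (by simp), if_pos rfl]
      omega
    · have hft : func ∈ t := by
        rcases List.mem_cons.1 hU with h | h
        · exact absurd h hu
        · exact h
      have ihs := ih hft
      have e1 : (decide (u ∉ path ++ [func])) = decide (u ∉ path) := by
        apply decide_eq_decide.2
        constructor
        · intro h hc
          exact h (by simp [hc])
        · intro h hc
          rcases List.mem_append.1 hc with hc | hc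
          · exact h hc
          · simp at hc
            exact hu hc.symm
      rw [e1]
      omega


theorem pv_mem_getD (cg : List (String × List String)) (k x : String)
    (h : x ∈ (PySem.Dict.mk cg).getD k []) : x ∈ cg.flatMap (fun p => p.2) := by
  induction cg with
  | nil =>
    rw [show (PySem.Dict.mk ([] : List (String × List String))).getD k [] = [] from rfl] at h
    simp at h
  | cons a t ih =>
    obtain ⟨a1, a2⟩ := a
    rw [show (PySem.Dict.mk ((a1, a2) :: t)).getD k [] =
        if a1 == k then a2 else (PySem.Dict.mk t).getD k [] by
      simp [PySem.Dict.getD, PySem.Dict.get?_mk_cons]; split <;> rfl] at h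
    simp only [List.flatMap_cons, List.mem_append]
    split at h
    · exact Or.inl h
    · exact Or.inr (ih h)


theorem pv_getD_len (cg : List (String × List String)) (k : String) :
    ((PySem.Dict.mk cg).getD k []).length ≤ (cg.flatMap (fun p => p.2)).length := by
  induction cg with
  | nil =>
    rw [show (PySem.Dict.mk ([] : List (String × List String))).getD k [] = [] from rfl]
    simp
  | cons a t ih =>
    obtain ⟨a1, a2⟩ := a
    rw [show (PySem.Dict.mk ((a1, a2) :: t)).getD k [] =
        if a1 == k then a2 else (PySem.Dict.mk t).getD k [] by
      simp [PySem.Dict.getD, PySem.Dict.get?_mk_cons]; split <;> rfl]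
    simp only [List.flatMap_cons, List.length_append]
    split
    · omega
    · omega


theorem pv_mem_kids (cg : List (String × List String)) (s func c : String)
    (h : c ∈ pvKids cg func) : c ∈ pvNodes cg s := by
  unfold pvKids at h
  rw [PySem.List.mem_sorted] at h
  exact List.mem_cons_of_mem _ (pv_mem_getD cg func c h)


theorem pv_kids_len (cg : List (String × List String)) (func : String) :
    (pvKids cg func).length ≤ (cg.flatMap (fun p => p.2)).length := by
  unfold pvKids
  rw [PySem.List.length_sorted]
  exact pv_getD_len cg func


theorem pvCost_pos (cg : List (String × List String)) (tks : List String)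
    (f : Nat) (func : String) (path : List String) : 1 ≤ pvCost cg tks f func path := by
  cases f with
  | zero => simp [pvCost]
  | succ f =>
    simp only [pvCost]
    split
    · omega
    · split
      · omega
      · omega


theorem pvDfsP_fuel (cg : List (String × List String)) (s : String) (tks : List String) :
    ∀ (f g : Nat) (func : String) (path : List String), func ∈ pvNodes cg s →
      pvM (pvNodes cg s) path < f → pvM (pvNodes cg s) path < g →
      pvDfsP cg tks f func path = pvDfsP cg tks g func path := by
  intro f
  induction f with
  | zero => intro g func path _ hf _; omega
  | succ f ih =>
    intro g func path hU hf hg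
    cases g with
    | zero => omega
    | succ g =>
      simp only [pvDfsP]
      split
      · rfl
      · rename_i hnp
        split
        · rfl
        · apply List.flatMap_congr
          intro c hc
          apply ih
          · exact pv_mem_kids cg s func c hc
          · have := pvM_lt (pvNodes cg s) path func hU hnp
            omega
          · have := pvM_lt (pvNodes cg s) path func hU hnp
            omega


theorem pvCost_fuel (cg : List (String × List String)) (s : String) (tks : List String) :
    ∀ (f g : Nat) (func : String) (path : List String), func ∈ pvNodes cg s →
      pvM (pvNodes cg s) path < f → pvM (pvNodes cg s) path < g →
      pvCost cg tks f func path = pvCost cg tks g func path := by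
  intro f
  induction f with
  | zero => intro g func path _ hf _; omega
  | succ f ih =>
    intro g func path hU hf hg
    cases g with
    | zero => omega
    | succ g =>
      simp only [pvCost]
      split
      · rfl
      · rename_i hnp
        split
        · rfl
        · have : (pvKids cg func).map (fun c => pvCost cg tks f c (path ++ [func])) =
              (pvKids cg func).map (fun c => pvCost cg tks g c (path ++ [func])) := by
            apply List.map_congr_left
            intro c hc
            apply ih
            · exact pv_mem_kids cg s func c hc
            · have := pvM_lt (pvNodes cg s) path func hU hnp
              omega
            · have := pvM_lt (pvNodes cg s) path func hU hnp
              omega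
          rw [this]


theorem pvCost_le_pow (cg : List (String × List String)) (tks : List String) :
    ∀ (f : Nat) (func : String) (path : List String),
      pvCost cg tks f func path ≤ ((cg.flatMap (fun p => p.2)).length + 1) ^ f := by
  intro f
  induction f with
  | zero => intro func path; simp [pvCost]
  | succ f ih =>
    intro func path
    have hpow : 1 ≤ ((cg.flatMap (fun p => p.2)).length + 1) ^ f := Nat.one_le_pow _ _ (by omega)
    simp only [pvCost]
    split
    · calc 1 ≤ ((cg.flatMap (fun p => p.2)).length + 1) ^ f := hpow
        _ ≤ _ := Nat.pow_le_pow_right (by omega) (by omega)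
    · split
      · calc 1 ≤ ((cg.flatMap (fun p => p.2)).length + 1) ^ f := hpow
          _ ≤ _ := Nat.pow_le_pow_right (by omega) (by omega)
      · have hsum : ((pvKids cg func).map (fun c => pvCost cg tks f c (path ++ [func]))).sum ≤
            (pvKids cg func).length * ((cg.flatMap (fun p => p.2)).length + 1) ^ f := by
          have := List.sum_le_card_nsmul
            ((pvKids cg func).map (fun c => pvCost cg tks f c (path ++ [func])))
            (((cg.flatMap (fun p => p.2)).length + 1) ^ f)
            (by intro x hx; obtain ⟨c, _, rfl⟩ := List.mem_map.1 hx; exact ih c _)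
          simpa [smul_eq_mul] using this
        have hlen := pv_kids_len cg func
        have : (pvKids cg func).length * ((cg.flatMap (fun p => p.2)).length + 1) ^ f ≤
            (cg.flatMap (fun p => p.2)).length * ((cg.flatMap (fun p => p.2)).length + 1) ^ f :=
          Nat.mul_le_mul_right _ hlen
        have hexp : ((cg.flatMap (fun p => p.2)).length + 1) ^ (f + 1) =
            ((cg.flatMap (fun p => p.2)).length + 1) ^ f +
            (cg.flatMap (fun p => p.2)).length * ((cg.flatMap (fun p => p.2)).length + 1) ^ f := by
          ring
        omega


theorem pvDfsA_eq_dfsP (cg : List (String × List String)) (tks : List String) :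
    ∀ (f : Nat) (func : String) (chain : List String) (v : PySem.Set String),
      (∀ x, x ∈ v ↔ x ∈ chain) →
      pvDfsA cg tks f func chain v = pvDfsP cg tks f func chain := by
  intro f
  induction f with
  | zero => intro func chain v _; rfl
  | succ f ih =>
    intro func chain v hv
    simp only [pvDfsA, pvDfsP]
    have hc : PySem.Set.contains v func = decide (func ∈ chain) := by
      simp [pysem, hv func]
    rw [hc]
    by_cases hm : func ∈ chain
    · simp [hm]
    · simp only [hm, decide_false, Bool.false_eq_true, if_false]
      split
      · rfl
      · rw [PySem.List.foldl_append_eq_flatMap]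
        simp only [List.nil_append]
        apply List.flatMap_congr
        intro c _
        apply ih
        intro x
        rw [PySem.Set.mem_add, hv x]
        simp


theorem pv_push_rev (xs : List String) (np : List String) (rest : List (String × List String)) :
    xs.reverse.foldl (fun st c => (c, np) :: st) rest = xs.map (fun c => (c, np)) ++ rest := by
  rw [List.foldl_reverse]
  induction xs with
  | nil => rfl
  | cons x t ih => simp [ih]


theorem pvRunB_main (cg : List (String × List String)) (s : String) (tks : List String) :
    ∀ (fB : Nat) (stack : List (String × List String)),
      (∀ fr ∈ stack, fr.1 ∈ pvNodes cg s) →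
      (stack.map (fun fr => pvCost cg tks ((pvNodes cg s).length + 1) fr.1 fr.2)).sum ≤ fB →
      pvRunB cg tks fB stack =
        stack.flatMap (fun fr => pvDfsP cg tks ((pvNodes cg s).length + 1) fr.1 fr.2) := by
  intro fB
  induction fB with
  | zero =>
    intro stack hinv hsum
    cases stack with
    | nil => rfl
    | cons fr rest =>
      exfalso
      have := pvCost_pos cg tks ((pvNodes cg s).length + 1) fr.1 fr.2
      simp only [List.map_cons, List.sum_cons] at hsum
      omega
  | succ fB ih =>
    intro stack hinv hsum
    cases stack with
    | nil => rfl
    | cons fr rest =>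
      obtain ⟨func, path⟩ := fr
      have hU : func ∈ pvNodes cg s := hinv (func, path) (List.mem_cons_self ..)
      simp only [List.map_cons, List.sum_cons] at hsum
      have hcp := pvCost_pos cg tks ((pvNodes cg s).length + 1) func path
      simp only [pvRunB, List.flatMap_cons]
      have hcont : (path.contains func) = decide (func ∈ path) := by simp
      rw [hcont]
      by_cases hm : func ∈ path
      · simp only [hm, decide_true, if_true]
        rw [ih rest (fun fr h => hinv fr (List.mem_cons_of_mem _ h)) (by omega)]
        simp [pvDfsP, hm]
      · simp only [hm, decide_false, Bool.false_eq_true, if_false]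
        -- cost of the head frame, one unfolding
        have hcost : pvCost cg tks ((pvNodes cg s).length + 1) func path =
            if pvHit tks (path ++ [func]) then 1
            else 1 + ((pvKids cg func).map
              (fun c => pvCost cg tks ((pvNodes cg s).length) c (path ++ [func]))).sum := by
          simp only [pvCost, hm, if_false]
        have hmlt : pvM (pvNodes cg s) (path ++ [func]) < (pvNodes cg s).length := by
          have h1 := pvM_lt (pvNodes cg s) path func hU hm
          have h2 : pvM (pvNodes cg s) path ≤ (pvNodes cg s).length := List.countP_le_length
          omega
        split
        · rename_i hhit
          rw [ih rest (fun fr h => hinv fr (List.mem_cons_of_mem _ h)) (by omega)]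
          simp [pvDfsP, hm, hhit]
        · rename_i hhit
          rw [pv_push_rev]
          have hinv' : ∀ fr ∈ (pvKids cg func).map (fun c => (c, path ++ [func])) ++ rest,
              fr.1 ∈ pvNodes cg s := by
            intro fr h
            rcases List.mem_append.1 h with h | h
            · obtain ⟨c, hc, rfl⟩ := List.mem_map.1 h
              exact pv_mem_kids cg s func c hc
            · exact hinv fr (List.mem_cons_of_mem _ h)
          have hkid_cost : ∀ c ∈ pvKids cg func,
              pvCost cg tks ((pvNodes cg s).length) c (path ++ [func]) =
              pvCost cg tks ((pvNodes cg s).length + 1) c (path ++ [func]) := by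
            intro c hc
            exact pvCost_fuel cg s tks _ _ c (path ++ [func]) (pv_mem_kids cg s func c hc)
              hmlt (by omega)
          have hsum' : (((pvKids cg func).map (fun c => (c, path ++ [func])) ++ rest).map
              (fun fr => pvCost cg tks ((pvNodes cg s).length + 1) fr.1 fr.2)).sum ≤ fB := by
            rw [hcost, if_neg hhit] at hsum
            have e : ((pvKids cg func).map (fun c => (c, path ++ [func]))).map
                (fun fr => pvCost cg tks ((pvNodes cg s).length + 1) fr.1 fr.2) =
                (pvKids cg func).map
                  (fun c => pvCost cg tks ((pvNodes cg s).length) c (path ++ [func])) := by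
              rw [List.map_map]
              apply List.map_congr_left
              intro c hc
              exact (hkid_cost c hc).symm
            rw [List.map_append, List.sum_append, e]
            omega
          rw [ih _ hinv' hsum']
          rw [List.flatMap_append, List.flatMap_map]
          have hd : pvDfsP cg tks ((pvNodes cg s).length + 1) func path =
              (pvKids cg func).flatMap
                (fun c => pvDfsP cg tks ((pvNodes cg s).length) c (path ++ [func])) := by
            simp only [pvDfsP, hm, if_false, hhit, Bool.false_eq_true]
          have he : (pvKids cg func).flatMap
                (fun c => pvDfsP cg tks ((pvNodes cg s).length) c (path ++ [func])) =
              (pvKids cg func).flatMap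
                (fun c => pvDfsP cg tks ((pvNodes cg s).length + 1) c (path ++ [func])) := by
            apply List.flatMap_congr
            intro c hc
            exact pvDfsP_fuel cg s tks _ _ c (path ++ [func]) (pv_mem_kids cg s func c hc)
              hmlt (by omega)
          rw [hd, he]


-- ===== VERDICT (by name: the statement is the Claim_ definition above) =====
theorem find_truncated_call_chains_spec : Claim_equal_find_truncated_call_chains := by
  intro cg s tks _
  unfold Spec_find_truncated_call_chains
  unfold find_truncated_call_chains find_truncated_call_chains_alt
  rw [pvDfsA_eq_dfsP cg tks _ s [] PySem.Set.empty (by simp [PySem.Set.empty])]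
  rw [pvRunB_main cg s tks _ [(s, [])]
      (by intro fr h; simp at h; subst h; simp [pvNodes])
      (by simpa using pvCost_le_pow cg tks ((pvNodes cg s).length + 1) s [])]
  simp
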